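-- pv_equiv track=rewrite | github.com/S0okJu/BOJ | Silver/1000-1999/1900-1999/1946/1946.py | solution
-- ===== SOURCE A (Python) =====
-- def solution(N, cands):
--
--     # [(1, 4), (2, 5), (3, 6), (4, 2), (5, 7), (6, 1), (7, 3)]
--     cands.sort()
--
--     # 1차 1등은 우선 선별함
--     result = 1
--
--     # 2차를 기준으로 합격자 선발
--     # 1차에서 1등한 합격자의 2차 순위를 기반으로 합격자 선별
--     # 단 1등 1차보다 2차 순위가 높은 후보자 내에서도 합격자를 선발해야 하므로
--     # 2차 등수의 범위를 지속적으로 조정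
--     min_second = cands[0][1]
--
--     for i in range(1,N):
--         if cands[i][1] < min_second:
--             result +=1
--             min_second = cands[i][1]
--
--     return result
-- ===== SOURCE B (Python) =====
-- def solution(N, cands):
--     cands.sort()
--     # candidate 0 (best stage-1 rank) is always accepted; a later candidate is
--     # accepted iff every already-seen candidate has a strictly worse stage-2 rank
--     rest = [b for i, (_, b) in enumerate(cands) if 1 <= i < N]
--     count = 1
--     prev = [cands[0][1]]
--     for b in rest:
--         if all(p > b for p in prev):
--             count += 1
--         prev.append(b)
--     return count
-- ===== Notes on version B (the rewrite author's own statement) =====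
-- stated objective: alternative
-- what changed: Replaces A's single-pass running prefix-minimum with a staged dominance count: after the same in-place sort it extracts the considered stage-2 ranks by an enumerate/filter comprehension and accepts each candidate iff ALL previously seen candidates have a strictly larger stage-2 rank (explicit list of seen ranks instead of a running minimum).
import Mathlib
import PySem

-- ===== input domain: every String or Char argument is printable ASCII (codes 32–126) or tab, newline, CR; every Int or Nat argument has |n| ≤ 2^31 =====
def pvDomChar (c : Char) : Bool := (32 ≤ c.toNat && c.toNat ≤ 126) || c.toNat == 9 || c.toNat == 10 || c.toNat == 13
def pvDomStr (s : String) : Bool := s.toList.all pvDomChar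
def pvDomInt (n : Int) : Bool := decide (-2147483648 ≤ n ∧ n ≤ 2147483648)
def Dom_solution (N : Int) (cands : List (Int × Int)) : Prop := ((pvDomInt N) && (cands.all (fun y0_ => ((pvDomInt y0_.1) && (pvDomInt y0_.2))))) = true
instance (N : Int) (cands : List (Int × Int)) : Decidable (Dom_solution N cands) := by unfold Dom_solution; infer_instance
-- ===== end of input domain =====

-- B replaces A's running prefix-minimum with a staged dominance count (considered stage-2
-- ranks extracted by enumerate/filter, each checked against the explicit list of all
-- previously seen ranks); same return value, same in-place sort of cands.

-- ===== PORT A =====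
def solution (N : Int) (cands : List (Int × Int)) : Int :=
  -- cands.sort()
  let s := PySem.List.sorted2 cands (fun x => x.1) (fun x => x.2)
  -- result = 1; min_second = cands[0][1]  (cands[0] raises on []; excluded by Pre_)
  -- for i in range(1, N): if cands[i][1] < min_second: result += 1; min_second = cands[i][1]
  let st := (PySem.List.pyRange 1 N 1).foldl
    (fun (st : Int × Int) i =>
      if (PySem.List.pyGetD s i (0, 0)).2 < st.2 then
        (st.1 + 1, (PySem.List.pyGetD s i (0, 0)).2)
      else st)
    (1, (PySem.List.pyGetD s 0 (0, 0)).2)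
  st.1

-- ===== PORT B =====
def solution_alt (N : Int) (cands : List (Int × Int)) : Int :=
  -- cands.sort()
  let s := PySem.List.sorted2 cands (fun x => x.1) (fun x => x.2)
  -- rest = [b for i, (_, b) in enumerate(cands) if 1 <= i < N]
  let rest := ((PySem.List.enumerate s).filter
      (fun p => decide (1 ≤ p.1) && decide (p.1 < N))).map (fun p => p.2.2)
  -- count = 1; prev = [cands[0][1]]
  -- for b in rest: (if all(p > b for p in prev): count += 1); prev.append(b)
  let st := rest.foldl
    (fun (st : Int × List Int) b =>
      (if st.2.all (fun p => decide (b < p)) then st.1 + 1 else st.1, st.2 ++ [b]))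
    (1, [(PySem.List.pyGetD s 0 (0, 0)).2])
  st.1

-- ===== PRECONDITION & SPEC =====
-- Pre_ excludes exactly the inputs where A raises IndexError: empty cands (cands[0]),
-- and N beyond the list length (cands[i] inside the loop).
def Pre_solution (N : Int) (cands : List (Int × Int)) : Prop :=
  cands ≠ [] ∧ N ≤ (cands.length : Int)
instance (N : Int) (cands : List (Int × Int)) : Decidable (Pre_solution N cands) := by
  unfold Pre_solution; infer_instance

def pvWitness_solution : Int × (List (Int × Int)) := (3, [(1, 4), (2, 5), (3, 2)])

def Spec_solution (N : Int) (cands : List (Int × Int)) (out : Int) : Prop := out = solution_alt N cands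
instance (N : Int) (cands : List (Int × Int)) (out : Int) : Decidable (Spec_solution N cands out) := by unfold Spec_solution; infer_instance

-- ===== CLAIM (what is proved, stated in full; the proofs are below) =====
def Claim_equal_solution : Prop := ∀ (N : Int) (cands : List (Int × Int)), Dom_solution N cands → Pre_solution N cands → Spec_solution N cands (solution N cands)

-- ===== LEMMAS AND PROOFS =====

-- B's "all previously seen ranks are larger" test agrees with A's running minimum:
-- if every x satisfies (prev.all (x < ·) ↔ x < m), the two folds produce the same count.
theorem dominance_core (bs : List Int) (c : Int) (prev : List Int) (m : Int)
    (h : ∀ x : Int, prev.all (fun p => decide (x < p)) = decide (x < m)) :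
    (bs.foldl (fun (st : Int × List Int) b =>
        (if st.2.all (fun p => decide (b < p)) then st.1 + 1 else st.1, st.2 ++ [b]))
      (c, prev)).1
    = (bs.foldl (fun (st : Int × Int) b => if b < st.2 then (st.1 + 1, b) else st) (c, m)).1 := by
  induction bs generalizing c prev m with
  | nil => rfl
  | cons b t ih =>
    simp only [List.foldl_cons, h b]
    by_cases hb : b < m
    · simp only [hb, decide_true, if_true]
      exact ih (c + 1) (prev ++ [b]) b (fun x => by
        by_cases hx : x < b
        · simp [List.all_append, h x, hx, lt_trans hx hb]
        · simp [List.all_append, hx])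
    · simp only [hb, decide_false, Bool.false_eq_true, if_false]
      exact ih c (prev ++ [b]) m (fun x => by
        by_cases hx : x < m
        · simp [List.all_append, h x, hx, lt_of_lt_of_le hx (le_of_not_gt hb)]
        · simp [List.all_append, h x, hx])

-- the filtered index set {j | 1 ≤ j < N} of range(0, L) is exactly range(1, N)
theorem filter_range_eq (L N : Int) (h0 : 0 ≤ L) (hN : N ≤ L) :
    (PySem.List.pyRange 0 L 1).filter (fun j => decide (1 ≤ j) && decide (j < N))
      = PySem.List.pyRange 1 N 1 := by
  by_cases h1 : N ≤ 1
  · rw [PySem.List.pyRange_one_eq_nil h1]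
    rw [List.filter_eq_nil_iff]
    intro j hj
    rw [PySem.List.mem_pyRange_one] at hj
    simp only [Bool.and_eq_true, decide_eq_true_eq, not_and]
    omega
  · rw [PySem.List.pyRange_one_append 0 1 L (by omega) (by omega),
        PySem.List.pyRange_one_append 1 N L (by omega) (by omega)]
    have hz : PySem.List.pyRange 0 1 1 = [0] := by
      have := PySem.List.pyRange_one_singleton 0
      simpa using this
    rw [List.filter_append, List.filter_append, hz]
    have hmid : (PySem.List.pyRange 1 N 1).filter (fun j => decide (1 ≤ j) && decide (j < N))
        = PySem.List.pyRange 1 N 1 := by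
      rw [List.filter_eq_self]
      intro j hj
      rw [PySem.List.mem_pyRange_one] at hj
      simp only [Bool.and_eq_true, decide_eq_true_eq]
      omega
    have htail : (PySem.List.pyRange N L 1).filter (fun j => decide (1 ≤ j) && decide (j < N))
        = [] := by
      rw [List.filter_eq_nil_iff]
      intro j hj
      rw [PySem.List.mem_pyRange_one] at hj
      simp only [Bool.and_eq_true, decide_eq_true_eq, not_and]
      omega
    rw [hmid, htail]
    simp

-- B's comprehension over enumerate(cands) yields the stage-2 ranks A indexes by range(1, N)
theorem rest_eq (s : List (Int × Int)) (N : Int) (hN : N ≤ (s.length : Int)) :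
    ((PySem.List.enumerate s).filter (fun p => decide (1 ≤ p.1) && decide (p.1 < N))).map
        (fun p => p.2.2)
      = (PySem.List.pyRange 1 N 1).map (fun i => (PySem.List.pyGetD s i (0, 0)).2) := by
  rw [PySem.List.enumerate_eq_map_pyRange s ((0 : Int), (0 : Int))]
  rw [List.filter_map, List.map_map]
  simp only [Function.comp_def]
  have hlen : PySem.List.len s = (s.length : Int) := by
    simp [PySem.List.len]
  rw [hlen, filter_range_eq (s.length : Int) N (by positivity) hN]

-- ===== VERDICT (by name: the statement is the Claim_ definition above) =====
theorem solution_spec : Claim_equal_solution := by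
  intro N cands _ hpre
  unfold Spec_solution
  obtain ⟨hne, hN⟩ := hpre
  simp only [solution, solution_alt]
  have hlen : ((PySem.List.sorted2 cands (fun x => x.1) (fun x => x.2)).length : Int)
      = (cands.length : Int) := by
    exact_mod_cast congrArg Nat.cast
      (PySem.List.sorted2_perm cands (fun x => x.1) (fun x => x.2) false).length_eq
  set s := PySem.List.sorted2 cands (fun x => x.1) (fun x => x.2) with hs
  rw [rest_eq s N (by omega)]
  have h := dominance_core
    ((PySem.List.pyRange 1 N 1).map (fun i => (PySem.List.pyGetD s i (0, 0)).2))
    1 [(PySem.List.pyGetD s 0 (0, 0)).2] ((PySem.List.pyGetD s 0 (0, 0)).2)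
    (fun x => by simp)
  simp only [List.foldl_map] at h ⊢
  exact h.symm
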